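-- pv_equiv track=rewrite | github.com/TongWu/Table-Depedency-Tracer | SasDependencyTracer.py | sanitize_macro_value
-- ===== SOURCE A (Python) =====
-- def sanitize_macro_value(value: str) -> str:
--     """Normalize a macro assignment RHS to make dataset detection easier."""
--
--     v = value.strip()
--     # Remove surrounding quotes.
--     if (v.startswith("'") and v.endswith("'")) or (v.startswith('"') and v.endswith('"')):
--         v = v[1:-1]
--
--     # Remove simple %str()/ %nrstr()/ %upcase() wrappers.
--     SIMPLE_WRAPPERS = ("%str", "%nrstr", "%upcase", "%quote", "%nrquote")
--     for prefix in SIMPLE_WRAPPERS: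
--         lower = v.lower()
--         if lower.startswith(prefix + "(") and v.endswith(")"):
--             v = v[len(prefix) + 1 : -1]
--             v = v.strip()
--             break
--
--     return v.strip()
-- ===== SOURCE B (Python) =====
-- import re
--
-- # One anchored, case-insensitive pattern replaces the explicit prefix scan:
-- # \Z (not $) and DOTALL make the tail behave exactly like endswith(")").
-- _WRAPPER_RE = re.compile(r"^%(?:str|nrstr|upcase|quote|nrquote)\((.*)\)\Z",
--                          re.IGNORECASE | re.DOTALL)
--
-- def sanitize_macro_value(value: str) -> str:
--     """Normalize a macro assignment RHS to make dataset detection easier."""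
--     v = value.strip()
--     # Remove surrounding quotes.
--     if (v.startswith("'") and v.endswith("'")) or (v.startswith('"') and v.endswith('"')):
--         v = v[1:-1]
--     # Remove simple %str()/%nrstr()/%upcase()/%quote()/%nrquote() wrappers.
--     m = _WRAPPER_RE.match(v)
--     if m:
--         v = m.group(1).strip()
--     return v.strip()
-- ===== Notes on version B (the rewrite author's own statement) =====
-- stated objective: idiomatic
-- what changed: The explicit scan over the five wrapper prefixes (re-lowering v and testing startswith/endswith per prefix, slicing by hand) is replaced by a single anchored case-insensitive regular expression with a capturing group, matched once; the wrapper body is the captured group.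
import Mathlib
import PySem

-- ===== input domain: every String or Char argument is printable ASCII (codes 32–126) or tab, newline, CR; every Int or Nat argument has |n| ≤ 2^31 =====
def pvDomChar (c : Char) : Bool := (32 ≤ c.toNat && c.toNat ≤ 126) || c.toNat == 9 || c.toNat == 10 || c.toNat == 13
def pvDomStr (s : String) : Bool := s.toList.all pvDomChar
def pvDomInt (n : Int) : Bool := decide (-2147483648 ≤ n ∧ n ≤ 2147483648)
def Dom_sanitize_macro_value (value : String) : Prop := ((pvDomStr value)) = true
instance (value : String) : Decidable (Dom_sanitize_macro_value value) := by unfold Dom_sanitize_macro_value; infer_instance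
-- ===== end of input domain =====

-- B replaces A's explicit scan over the five wrapper prefixes by one anchored case-insensitive
-- regular expression with a capturing group (idiomatic; same cost).

-- ===== PORT A =====
-- SIMPLE_WRAPPERS, as lists of code points
def pvWrappers : List (List Char) :=
  [['%','s','t','r'], ['%','n','r','s','t','r'], ['%','u','p','c','a','s','e'],
   ['%','q','u','o','t','e'], ['%','n','r','q','u','o','t','e']]

-- the 'for prefix in SIMPLE_WRAPPERS: … break' loop of A
def pvWrapA : List (List Char) → List Char → List Char
  | [], v => v
  | p :: rest, v =>
    if PySem.Chars.startswith (PySem.Chars.lower v) (p ++ ['(']) && PySem.Chars.endswith v [')'] then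
      PySem.Chars.strip (PySem.List.slice v (some ((p.length : Int) + 1)) (some (-1)))
    else pvWrapA rest v

def sanitize_macro_value (value : String) : String :=
  let v := PySem.Chars.strip value.toList
  let v := if (PySem.Chars.startswith v ['\''] && PySem.Chars.endswith v ['\'']) ||
              (PySem.Chars.startswith v ['"'] && PySem.Chars.endswith v ['"']) then
             PySem.List.slice v (some 1) (some (-1)) else v
  String.ofList (PySem.Chars.strip (pvWrapA pvWrappers v))

-- ===== PORT B =====
-- Hand port of B's compiled regex r"^%(?:str|nrstr|upcase|quote|nrquote)\((.*)\)\Z" with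
-- re.IGNORECASE | re.DOTALL, specialised to this pattern; exact on the stated ASCII domain.

-- a literal run of pattern characters (pattern is lowercase; IGNORECASE lowers the input char);
-- returns the unconsumed rest of the input
def pvReLit : List Char → List Char → Option (List Char)
  | [], s => some s
  | _ :: _, [] => none
  | p :: ps, c :: cs => if PySem.Chars.lowerChar c = p then pvReLit ps cs else none

-- the tail "(.*)\)\Z" under DOTALL: the greedy group backtracks to leave exactly one char for
-- "\)", so it succeeds iff the rest ends with ')' and captures everything before that ')'
def pvReTail (s : List Char) : Option (List Char) :=
  if PySem.Chars.endswith s [')'] then some s.dropLast else none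

-- the alternation "(?:str|nrstr|upcase|quote|nrquote)": alternatives tried left to right,
-- backtracking into the next alternative when the rest of the pattern fails
def pvReAlt : List (List Char) → List Char → Option (List Char)
  | [], _ => none
  | a :: as, s =>
    match pvReLit (a ++ ['(']) s with
    | some r =>
      match pvReTail r with
      | some g => some g
      | none => pvReAlt as s
    | none => pvReAlt as s

def pvAlts : List (List Char) :=
  [['s','t','r'], ['n','r','s','t','r'], ['u','p','c','a','s','e'],
   ['q','u','o','t','e'], ['n','r','q','u','o','t','e']]

-- _WRAPPER_RE.match(v): "^%" then the alternation then "\((.*)\)\Z"; some = the captured group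
def pvReMatch (v : List Char) : Option (List Char) :=
  match pvReLit ['%'] v with
  | some r => pvReAlt pvAlts r
  | none => none

def sanitize_macro_value_alt (value : String) : String :=
  let v := PySem.Chars.strip value.toList
  let v := if (PySem.Chars.startswith v ['\''] && PySem.Chars.endswith v ['\'']) ||
              (PySem.Chars.startswith v ['"'] && PySem.Chars.endswith v ['"']) then
             PySem.List.slice v (some 1) (some (-1)) else v
  let v := match pvReMatch v with
           | some g => PySem.Chars.strip g
           | none => v
  String.ofList (PySem.Chars.strip v)

-- ===== PRECONDITION & SPEC =====
def Spec_sanitize_macro_value (value : String) (out : String) : Prop := out = sanitize_macro_value_alt value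
instance (value : String) (out : String) : Decidable (Spec_sanitize_macro_value value out) := by unfold Spec_sanitize_macro_value; infer_instance

-- ===== CLAIM (what is proved, stated in full; the proofs are below) =====
def Claim_equal_sanitize_macro_value : Prop := ∀ (value : String), Dom_sanitize_macro_value value → Spec_sanitize_macro_value value (sanitize_macro_value value)

-- ===== LEMMAS AND PROOFS =====

theorem lowerChar_eq_paren (c : Char) : PySem.Chars.lowerChar c = '(' ↔ c = '(' := by
  simp only [PySem.Chars.lowerChar, PySem.Chars.isupper]
  split_ifs with h
  · simp only [Bool.and_eq_true, decide_eq_true_eq, Char.le_def] at h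
    constructor
    · intro he
      exfalso
      have hA : ('A':Char).toNat ≤ c.toNat := h.1
      have hZ : c.toNat ≤ ('Z':Char).toNat := h.2
      have hv : (Char.ofNat (c.toNat + 32)).toNat = ('(' : Char).toNat := by rw [he]
      rw [Char.toNat_ofNat] at hv
      have e1 : ('A':Char).toNat = 65 := rfl
      have e2 : ('Z':Char).toNat = 90 := rfl
      have e3 : ('(':Char).toNat = 40 := rfl
      rw [e1] at hA; rw [e2] at hZ; rw [e3] at hv
      rw [if_pos (Or.inl (by omega : c.toNat + 32 < 0xd800))] at hv
      omega
    · intro he; subst he; revert h; decide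
  · simp

-- a literal run matches iff the lowered input starts with it, and consumes exactly its length
theorem reLit_eq (p s : List Char) :
    pvReLit p s = if p <+: List.map PySem.Chars.lowerChar s then some (s.drop p.length) else none := by
  induction p generalizing s with
  | nil => simp [pvReLit]
  | cons x xs ih =>
    cases s with
    | nil => simp [pvReLit]
    | cons c cs =>
      simp only [pvReLit, List.map_cons, List.cons_prefix_cons, ih, List.length_cons,
        List.drop_succ_cons]
      by_cases hx : PySem.Chars.lowerChar c = x
      · rw [if_pos hx]
        by_cases hp : xs <+: List.map PySem.Chars.lowerChar cs
        · rw [if_pos hp, if_pos ⟨hx.symm, hp⟩]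
        · rw [if_neg hp, if_neg (fun h => hp h.2)]
      · rw [if_neg hx, if_neg (fun h => hx h.1.symm)]

-- xs[k:-1] for a natural k ≤ len is drop-then-dropLast
theorem slice_nat_neg_one (xs : List Char) (k : Nat) (hk : k ≤ xs.length) :
    PySem.List.slice xs (some (k:Int)) (some (-1)) = (xs.drop k).dropLast := by
  simp only [PySem.List.slice, PySem.List.clampIdx]
  norm_num
  rcases xs with _ | ⟨a, t⟩
  · simp
  · have h1 : ((((a::t).length : Int) + -1).toNat) = (a::t).length - 1 := by
      simp only [List.length_cons]; omega
    have hk0 : ¬((k : Int) < 0) := by omega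
    have hmin : min k (a::t).length = k := Nat.min_eq_left hk
    simp only [reduceCtorEq, if_false, h1, hk0, hmin]
    rw [List.dropLast_eq_take, List.length_drop]
    congr 1
    omega

theorem getLast?_drop_ne_nil (l : List Char) (m : Nat) (h : l.drop m ≠ []) :
    (l.drop m).getLast? = l.getLast? := by
  rw [List.getLast?_drop]
  simp only [ne_eq, List.drop_eq_nil_iff, not_le] at h
  rw [if_neg (by omega)]

theorem singleton_suffix_iff (c : Char) (l : List Char) : [c] <:+ l ↔ l.getLast? = some c := by
  rw [← List.reverse_prefix, List.getLast?_eq_head?_reverse]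
  cases hr : l.reverse with
  | nil => simp
  | cons x xs => simp [List.cons_prefix_cons, eq_comm]

-- endswith ')' is preserved by dropping a prefix, as long as something is left
theorem endswith_drop (v : List Char) (m : Nat) (h : v.drop m ≠ []) :
    PySem.Chars.endswith (v.drop m) [')'] = PySem.Chars.endswith v [')'] := by
  rw [Bool.eq_iff_iff, PySem.Chars.endswith_iff, PySem.Chars.endswith_iff,
    singleton_suffix_iff, singleton_suffix_iff, getLast?_drop_ne_nil v m h]

-- if the lowered v is exactly a wrapper head (ending in '('), v cannot end with ')'
theorem not_endswith_of_full_prefix (v p : List Char)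
    (hp : p ++ ['('] <+: List.map PySem.Chars.lowerChar v) (hlen : v.length ≤ p.length + 1) :
    PySem.Chars.endswith v [')'] = false := by
  have hle : p.length + 1 ≤ v.length := by
    have := hp.length_le
    simpa using this
  have hlv : v.length = p.length + 1 := le_antisymm hlen hle
  have hveq : List.map PySem.Chars.lowerChar v = p ++ ['('] := by
    have ht := List.prefix_iff_eq_take.mp hp
    rw [List.take_of_length_le (by simp [hlv])] at ht
    exact ht.symm
  by_contra hne
  simp only [Bool.not_eq_false] at hne
  rw [PySem.Chars.endswith_iff, singleton_suffix_iff] at hne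
  have hlast : (List.map PySem.Chars.lowerChar v).getLast? = some '(' := by
    rw [hveq]; simp
  rw [List.getLast?_map, hne] at hlast
  simp only [Option.map_some, Option.some.injEq] at hlast
  have : (')' : Char) = '(' := (lowerChar_eq_paren ')').mp hlast
  exact absurd this (by decide)

-- if '%' does not head the lowered v, A's loop falls through every wrapper
theorem wrapA_none (ws : List (List Char)) (v : List Char)
    (hws : ∀ w ∈ ws, w.head? = some '%')
    (h : ¬ (['%'] <+: List.map PySem.Chars.lowerChar v)) :
    pvWrapA ws v = v := by
  induction ws with
  | nil => rfl
  | cons w rest ih =>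
    have hhead := hws w (List.mem_cons_self)
    have hL : PySem.Chars.lower v = List.map PySem.Chars.lowerChar v := rfl
    have hsw : PySem.Chars.startswith (PySem.Chars.lower v) (w ++ ['(']) = false := by
      by_contra hc
      simp only [Bool.not_eq_false] at hc
      rw [PySem.Chars.startswith_iff, hL] at hc
      apply h
      rcases w with _ | ⟨x, xs⟩
      · simp at hhead
      · simp only [List.head?_cons, Option.some.injEq] at hhead
        subst hhead
        have h1 : ['%'] <+: ('%' :: xs) ++ ['('] := by simp [List.cons_prefix_cons]
        exact h1.trans hc
    simp only [pvWrapA, hsw, Bool.false_and]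
    exact ih (fun w hw => hws w (List.mem_cons_of_mem _ hw))

-- main correspondence: A's loop over '%'-prefixed wrappers vs B's regex alternation on v.drop 1
theorem wrap_alt_eq (as : List (List Char)) (v : List Char)
    (h : ['%'] <+: List.map PySem.Chars.lowerChar v) :
    pvWrapA (as.map (fun a => '%' :: a)) v =
      (match pvReAlt as (v.drop 1) with
       | some g => PySem.Chars.strip g
       | none => v) := by
  induction as with
  | nil => rfl
  | cons a rest ih =>
    simp only [List.map_cons, pvWrapA, pvReAlt]
    rw [reLit_eq]
    have hmapdrop : List.map PySem.Chars.lowerChar (v.drop 1)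
        = (List.map PySem.Chars.lowerChar v).drop 1 := List.map_drop ..
    have hL : PySem.Chars.lower v = List.map PySem.Chars.lowerChar v := rfl
    by_cases hpre : a ++ ['('] <+: List.map PySem.Chars.lowerChar (v.drop 1)
    · -- the literal head of this alternative matches
      rw [if_pos hpre]
      have hfull : ('%' :: a) ++ ['('] <+: List.map PySem.Chars.lowerChar v := by
        rcases v with _ | ⟨c, cs⟩
        · simp at h
        · have hc : '%' = PySem.Chars.lowerChar c := by
            simpa [List.cons_prefix_cons] using h
          simp only [List.cons_append, List.map_cons, List.cons_prefix_cons]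
          exact ⟨hc, by simpa using hpre⟩
      have hsw : PySem.Chars.startswith (PySem.Chars.lower v) (('%' :: a) ++ ['(']) = true := by
        rw [PySem.Chars.startswith_iff, hL]; exact hfull
      have hlenv : a.length + 2 ≤ v.length := by
        have := hfull.length_le
        simpa using this
      have hdrop : (v.drop 1).drop (a ++ ['(']).length = v.drop (a.length + 2) := by
        rw [List.drop_drop]
        congr 1
        simp
        omega
      rw [hdrop]
      by_cases hew : PySem.Chars.endswith v [')'] = true
      · -- ')' at the end: both strip the same slice
        have hne : v.drop (a.length + 2) ≠ [] := by
          intro hnil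
          have hlen2 : v.length ≤ a.length + 2 := by
            simpa using (List.drop_eq_nil_iff).mp hnil
          have hne := not_endswith_of_full_prefix v ('%' :: a) hfull (by simpa using hlen2)
          rw [hne] at hew
          exact absurd hew (by simp)
        have hewd : PySem.Chars.endswith (v.drop (a.length + 2)) [')'] = true := by
          rw [endswith_drop v _ hne, hew]
        have hslice : PySem.List.slice v (some ((('%' :: a).length : Int) + 1)) (some (-1))
            = (v.drop (a.length + 2)).dropLast := by
          have he2 : ((('%' :: a).length : Int) + 1) = ((a.length + 2 : Nat) : Int) := by
            simp; ring
          rw [he2, slice_nat_neg_one v _ hlenv]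
        have hsw2 : PySem.Chars.startswith (PySem.Chars.lower v) ('%' :: (a ++ ['('])) = true := hsw
        have he3 : ((a.length : Int) + 1 + 1) = ((a.length + 2 : Nat) : Int) := by push_cast; ring
        have hslice2 : PySem.List.slice v (some ((a.length : Int) + 1 + 1)) (some (-1))
            = (v.drop (a.length + 2)).dropLast := by
          rw [he3, slice_nat_neg_one v _ hlenv]
        simp [pvReTail, hsw2, hew, hewd, hslice2]
      · -- no ')' at the end: this alternative fails in its tail on both sides
        have hew' : PySem.Chars.endswith v [')'] = false := by simpa using hew
        have hewd : PySem.Chars.endswith (v.drop (a.length + 2)) [')'] = false := by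
          by_cases hne : v.drop (a.length + 2) = []
          · rw [hne]; decide
          · rw [endswith_drop v _ hne, hew']
        rw [ih]
        simp [pvReTail, hew', hewd]
    · -- the literal head of this alternative does not match
      have hsw : PySem.Chars.startswith (PySem.Chars.lower v) (('%' :: a) ++ ['(']) = false := by
        by_contra hc
        simp only [Bool.not_eq_false] at hc
        rw [PySem.Chars.startswith_iff, hL] at hc
        apply hpre
        rcases v with _ | ⟨c, cs⟩
        · simp at hc
        · simp only [List.cons_append, List.map_cons, List.cons_prefix_cons] at hc
          simpa using hc.2
      rw [if_neg hpre, ih]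
      have hsw2 : PySem.Chars.startswith (PySem.Chars.lower v) ('%' :: (a ++ ['('])) = false := hsw
      simp [hsw2, List.drop_one]

-- the wrapper-stripping phases agree
theorem wrap_eq (v : List Char) :
    pvWrapA pvWrappers v =
      (match pvReMatch v with
       | some g => PySem.Chars.strip g
       | none => v) := by
  have hW : pvWrappers = pvAlts.map (fun a => '%' :: a) := by decide
  unfold pvReMatch
  rw [reLit_eq]
  by_cases h : ['%'] <+: List.map PySem.Chars.lowerChar v
  · rw [if_pos h, hW]
    simpa using wrap_alt_eq pvAlts v h
  · rw [if_neg h, hW, wrapA_none _ v (by decide) h]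

-- ===== VERDICT (by name: the statement is the Claim_ definition above) =====
theorem sanitize_macro_value_spec : Claim_equal_sanitize_macro_value := by
  intro value _
  unfold Spec_sanitize_macro_value sanitize_macro_value sanitize_macro_value_alt
  simp only [wrap_eq]
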